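-- pv_equiv track=rewrite | github.com/francis-clairicia/EasyNetwork | src/easynetwork/lowlevel/api_async/backend/_asyncio/_asyncio_utils.py | _interleave_addrinfos
-- ===== SOURCE A (Python) =====
-- import itertools
-- from collections import OrderedDict
-- from collections.abc import Sequence
-- from typing import Any, cast
--
-- def _interleave_addrinfos(
--     addrinfos: Sequence[tuple[int, int, int, str, tuple[Any, ...]]]
-- ) -> list[tuple[int, int, int, str, tuple[Any, ...]]]:
--     """Interleave list of addrinfo tuples by family."""
--     # Group addresses by family
--     addrinfos_by_family: OrderedDict[int, list[tuple[Any, ...]]] = OrderedDict()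
--     for addr in addrinfos:
--         family = addr[0]
--         if family not in addrinfos_by_family:
--             addrinfos_by_family[family] = []
--         addrinfos_by_family[family].append(addr)
--     addrinfos_lists = list(addrinfos_by_family.values())
--     return [addr for addr in itertools.chain.from_iterable(itertools.zip_longest(*addrinfos_lists)) if addr is not None]
-- ===== SOURCE B (Python) =====
-- def _interleave_addrinfos(addrinfos):
--     """Interleave list of addrinfo tuples by family (decorate-sort-undecorate)."""
--     counts = {}
--     decorated = []
--     for addr in addrinfos:
--         family = addr[0]
--         if family in counts:
--             rank, pos = counts[family]
--         else:
--             rank, pos = len(counts), 0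
--         counts[family] = (rank, pos + 1)
--         decorated.append(((pos, rank), addr))
--     decorated.sort(key=lambda item: item[0])
--     return [addr for _, addr in decorated]
-- ===== Notes on version B (the rewrite author's own statement) =====
-- stated objective: alternative
-- what changed: B replaces A's group-into-dict-of-lists plus zip_longest round-robin (with None padding filtered out) by a single decorate pass assigning each address the key (position-within-its-family, family-first-occurrence-rank) followed by one stable sort on that key and an undecorate.
import Mathlib
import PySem

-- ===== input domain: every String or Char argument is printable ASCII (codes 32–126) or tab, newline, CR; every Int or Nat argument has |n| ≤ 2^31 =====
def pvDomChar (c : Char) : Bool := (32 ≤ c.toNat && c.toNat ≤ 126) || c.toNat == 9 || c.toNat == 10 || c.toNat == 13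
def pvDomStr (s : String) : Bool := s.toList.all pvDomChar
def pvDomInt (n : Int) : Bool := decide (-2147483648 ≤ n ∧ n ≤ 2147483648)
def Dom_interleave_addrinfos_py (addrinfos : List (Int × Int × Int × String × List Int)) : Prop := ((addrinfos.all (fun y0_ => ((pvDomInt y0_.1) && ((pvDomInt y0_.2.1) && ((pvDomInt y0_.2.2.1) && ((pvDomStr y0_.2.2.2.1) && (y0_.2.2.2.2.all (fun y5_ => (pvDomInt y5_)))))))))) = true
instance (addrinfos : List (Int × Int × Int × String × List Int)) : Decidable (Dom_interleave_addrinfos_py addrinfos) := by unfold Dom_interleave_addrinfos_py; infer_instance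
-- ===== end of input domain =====

-- B replaces A's group-by-family dict + zip_longest round-robin by a decorate/stable-sort/undecorate
-- pass keyed on (position-within-family, family-rank); same return value, objective: alternative algorithm.

abbrev pvAI : Type := Int × Int × Int × String × List Int

-- ===== PORT A =====
-- the body of A's grouping loop: `if family not in d: d[family] = []` then `d[family].append(addr)`
def pvGroupStep (d : PySem.Dict Int (List pvAI)) (addr : pvAI) : PySem.Dict Int (List pvAI) :=
  let d1 := if d.contains addr.1 then d else d.insert addr.1 []
  d1.modify addr.1 [] (fun l => l ++ [addr])

-- termination measure facts for the zip_longest loop (cited by pvRR's decreasing_by)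
lemma pvTails_sum_le {α : Type} (ls : List (List α)) :
    ((ls.map List.tail).map List.length).sum ≤ (ls.map List.length).sum := by
  induction ls with
  | nil => simp
  | cons l ls ih =>
    simp only [List.map_cons, List.sum_cons]
    have : l.tail.length ≤ l.length := by simp [List.length_tail]
    omega

lemma pvTails_sum_lt {α : Type} (ls : List (List α)) (h : ¬ (ls.map List.length).sum = 0) :
    ((ls.map List.tail).map List.length).sum < (ls.map List.length).sum := by
  induction ls with
  | nil => simp at h
  | cons l ls ih =>
    simp only [List.map_cons, List.sum_cons] at h ⊢
    rcases Nat.eq_zero_or_pos l.length with h0 | hp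
    · have hs : ¬ (ls.map List.length).sum = 0 := by omega
      have h1 := ih hs
      have h2 : l.tail.length ≤ l.length := by simp [List.length_tail]
      omega
    · have h1 : l.tail.length < l.length := by simp [List.length_tail]; omega
      have h2 := pvTails_sum_le ls
      omega

-- itertools.zip_longest(*lists) flattened by chain.from_iterable with the None padding filtered out:
-- emit the heads of the non-exhausted lists, then recurse on the tails, until every list is exhausted
def pvRR {α : Type} (ls : List (List α)) : List α :=
  if h : (ls.map List.length).sum = 0 then []
  else (ls.filterMap List.head?) ++ pvRR (ls.map List.tail)
  termination_by (ls.map List.length).sum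
  decreasing_by exact pvTails_sum_lt ls h

def interleave_addrinfos_py (addrinfos : List (Int × Int × Int × String × List Int)) : List (Int × Int × Int × String × List Int) :=
  let d := addrinfos.foldl pvGroupStep PySem.Dict.empty
  let addrinfos_lists := d.values
  pvRR addrinfos_lists

-- ===== PORT B =====
-- B's loop body: look up (rank, pos) for the family (new family: rank = len(counts), pos = 0),
-- store (rank, pos+1) back, and append the decorated element ((pos, rank), addr)
def pvDecStep (st : PySem.Dict Int (Int × Int) × List ((Int × Int) × pvAI)) (addr : pvAI) :
    PySem.Dict Int (Int × Int) × List ((Int × Int) × pvAI) :=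
  let counts := st.1
  let rankpos : Int × Int :=
    match counts.get? addr.1 with
    | some rp => rp
    | none => ((counts.size : Int), 0)
  (counts.insert addr.1 (rankpos.1, rankpos.2 + 1), st.2 ++ [((rankpos.2, rankpos.1), addr)])

def interleave_addrinfos_py_alt (addrinfos : List (Int × Int × Int × String × List Int)) : List (Int × Int × Int × String × List Int) :=
  let decorated := (addrinfos.foldl pvDecStep (PySem.Dict.empty, [])).2
  (PySem.List.sorted2 decorated (fun item => item.1.1) (fun item => item.1.2)).map (fun item => item.2)

-- ===== PRECONDITION & SPEC =====
def Spec_interleave_addrinfos_py (addrinfos : List (Int × Int × Int × String × List Int)) (out : List (Int × Int × Int × String × List Int)) : Prop := out = interleave_addrinfos_py_alt addrinfos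
instance (addrinfos : List (Int × Int × Int × String × List Int)) (out : List (Int × Int × Int × String × List Int)) : Decidable (Spec_interleave_addrinfos_py addrinfos out) := by unfold Spec_interleave_addrinfos_py; infer_instance

-- ===== CLAIM (what is proved, stated in full; the proofs are below) =====
def Claim_equal_interleave_addrinfos_py : Prop := ∀ (addrinfos : List (Int × Int × Int × String × List Int)), Dom_interleave_addrinfos_py addrinfos → Spec_interleave_addrinfos_py addrinfos (interleave_addrinfos_py addrinfos)

-- ===== LEMMAS AND PROOFS =====

-- common vocabulary: families in first-occurrence order, the group of a family, decorated groups
def pvK (xs : List pvAI) : List Int := PySem.Set.ofList (xs.map (fun a => a.1))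
def pvGrp (xs : List pvAI) (f : Int) : List pvAI := xs.filter (fun a => a.1 == f)
def pvGDec (r : Nat) (l : List pvAI) : List ((Int × Int) × pvAI) :=
  l.zipIdx.map (fun p => (((p.2 : Int), (r : Int)), p.1))
def pvGroupsD (xs : List pvAI) : List (List ((Int × Int) × pvAI)) :=
  (pvK xs).zipIdx.map (fun p => pvGDec p.2 (pvGrp xs p.1))
def pvKey (p : (Int × Int) × pvAI) : ℤ ×ₗ ℤ := toLex p.1

-- ---------- generic dict helpers ----------
lemma pvContains_iff {κ ν : Type} [BEq κ] [LawfulBEq κ] (d : PySem.Dict κ ν) (k : κ) :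
    d.contains k = true ↔ k ∈ d.keys := by
  simp [PySem.Dict.contains, PySem.Dict.keys, List.any_eq_true, List.mem_map]

lemma pvKeys_insert {κ ν : Type} [BEq κ] [LawfulBEq κ] (d : PySem.Dict κ ν) (k : κ) (v : ν) :
    (d.insert k v).keys = if d.contains k then d.keys else d.keys ++ [k] := by
  by_cases hc : d.contains k = true
  · simp only [PySem.Dict.insert, hc, if_true, PySem.Dict.keys, List.map_map]
    refine List.map_congr_left ?_
    intro p _
    by_cases hp : (p.1 == k) = true
    · simp [Function.comp, eq_of_beq hp]
    · simp [Function.comp, hp]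
  · simp [PySem.Dict.insert, hc, PySem.Dict.keys]

-- ---------- A-side characterisation ----------
lemma pvGroupStep_eq (d : PySem.Dict Int (List pvAI)) (a : pvAI) :
    pvGroupStep d a = d.modify a.1 [] (fun l => l ++ [a]) := by
  unfold pvGroupStep
  by_cases hc : d.contains a.1 = true
  · simp [hc]
  · simp only [hc, Bool.false_eq_true, if_false, PySem.Dict.modify]
    rw [PySem.Dict.insert_insert_self]
    have h1 : (d.insert a.1 ([] : List pvAI)).getD a.1 [] = [] := by
      simp
    have h2 : d.getD a.1 [] = ([] : List pvAI) := by
      simp [PySem.Dict.getD, (PySem.Dict.get?_eq_none_iff_contains d a.1).mpr (by simpa using hc)]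
    rw [h1, h2]

lemma pvA_eq (xs : List pvAI) :
    interleave_addrinfos_py xs = pvRR ((pvK xs).map (pvGrp xs)) := by
  show pvRR (xs.foldl pvGroupStep PySem.Dict.empty).values = _
  have hstep : xs.foldl pvGroupStep PySem.Dict.empty =
      xs.foldl (fun d a => d.modify a.1 [] (fun l => l ++ [a])) PySem.Dict.empty := by
    congr 1
    funext d a
    exact pvGroupStep_eq d a
  rw [hstep]
  have hkeys : (xs.foldl (fun d a => d.modify a.1 [] (fun l => l ++ [a])) PySem.Dict.empty).keys = pvK xs := by
    rw [PySem.Dict.keys_foldl_modify_key xs (fun a => a.1) [] (fun _ a => fun l => l ++ [a]) PySem.Dict.empty]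
    rfl
  have hnodup : (xs.foldl (fun d a => d.modify a.1 [] (fun l => l ++ [a])) PySem.Dict.empty).keys.Nodup := by
    rw [hkeys]; exact PySem.Set.nodup_ofList _
  have hgetD : ∀ c, (xs.foldl (fun d a => d.modify a.1 [] (fun l => l ++ [a])) PySem.Dict.empty).getD c [] = pvGrp xs c := by
    intro c
    have hfl : xs.foldl (fun d a => d.modify a.1 [] (fun l => l ++ [a])) PySem.Dict.empty =
        (xs.map (fun a => (a.1, a))).foldl (fun d p => d.modify p.1 [] (fun l => l ++ [p.2])) PySem.Dict.empty := by
      rw [List.foldl_map]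
    rw [hfl, PySem.Dict.getD_foldl_modify_append]
    simp only [List.filter_map, List.map_map]
    show _ ++ _ = _
    have he : (PySem.Dict.empty : PySem.Dict Int (List pvAI)).getD c [] = [] := rfl
    rw [he, List.nil_append]
    simp [Function.comp_def, pvGrp]
  rw [PySem.Dict.values_eq_map_keys _ hnodup [], hkeys]
  congr 1
  exact List.map_congr_left (fun c _ => hgetD c)

-- ---------- pvRR generic lemmas ----------
lemma pvRR_map {α β : Type} (g : α → β) (ls : List (List α)) :
    pvRR (ls.map (List.map g)) = (pvRR ls).map g := by
  induction ls using pvRR.induct with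
  | case1 ls h =>
    have hlen : (ls.map (List.map g)).map List.length = ls.map List.length := by
      simp [List.map_map, Function.comp]
    conv_lhs => rw [pvRR]
    conv_rhs => rw [pvRR]
    simp [hlen, h]
  | case2 ls h ih =>
    have hlen : (ls.map (List.map g)).map List.length = ls.map List.length := by
      simp [List.map_map, Function.comp]
    conv_lhs => rw [pvRR]
    conv_rhs => rw [pvRR]
    rw [hlen]
    have e1 : (ls.map (List.map g)).filterMap List.head? = (ls.filterMap List.head?).map g := by
      rw [List.filterMap_map, List.map_filterMap]
      congr 1
      funext l
      simp [Function.comp, List.head?_map]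
    have e2 : (ls.map (List.map g)).map List.tail = (ls.map List.tail).map (List.map g) := by
      simp only [List.map_map]
      congr 1
      funext l
      simp [Function.comp, List.map_tail]
    simp only [h, e1, e2, ih, List.map_append, dite_false]

lemma pvHeads_tails_perm {α : Type} (ls : List (List α)) :
    (ls.filterMap List.head? ++ (ls.map List.tail).flatten).Perm ls.flatten := by
  induction ls with
  | nil => simp
  | cons l ls ih =>
    cases l with
    | nil => simpa using ih
    | cons h t =>
      simp only [List.filterMap_cons, List.head?_cons, List.map_cons, List.tail_cons,
        List.flatten_cons, List.cons_append]
      refine List.Perm.cons h ?_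
      exact (List.perm_append_comm_assoc _ _ _).trans (List.Perm.append_left t ih)

lemma pvRR_perm_flatten {α : Type} (ls : List (List α)) : (pvRR ls).Perm ls.flatten := by
  induction ls using pvRR.induct with
  | case1 ls h =>
    rw [pvRR]
    simp only [h, dite_true]
    have : ls.flatten = [] := by
      rw [List.flatten_eq_nil_iff]
      intro l hl
      have : l.length = 0 := by
        by_contra hne
        have : 0 < (ls.map List.length).sum := by
          have : l.length ∈ ls.map List.length := List.mem_map_of_mem hl
          have := List.le_sum_of_mem this
          omega
        omega
      simpa [List.length_eq_zero_iff] using this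
    simp [this]
  | case2 ls h ih =>
    rw [pvRR]
    rw [dif_neg h]
    exact (List.Perm.append_left _ ih).trans (pvHeads_tails_perm ls)

-- keys along the round-robin: if the j-th element of the i-th list carries key (b+j, r+i),
-- the output is strictly increasing in pvKey and every first component is ≥ b
lemma pvKey_lt_iff (x y : (Int × Int) × pvAI) :
    (pvKey x < pvKey y) ↔ (x.1.1 < y.1.1 ∨ (x.1.1 = y.1.1 ∧ x.1.2 < y.1.2)) := by
  simpa [pvKey] using (Prod.Lex.toLex_lt_toLex (x := x.1) (y := y.1))

def pvH (ls : List (List ((Int × Int) × pvAI))) (b r : Nat) : Prop :=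
  ∀ i (hi : i < ls.length) j (hj : j < (ls[i]).length),
    ((ls[i])[j]).1 = (((b : Int) + (j : Int)), ((r : Int) + (i : Int)))

lemma pvHeads_facts (ls : List (List ((Int × Int) × pvAI))) :
    ∀ b r, pvH ls b r →
      ((ls.filterMap List.head?).Pairwise (fun x y => pvKey x < pvKey y)) ∧
      (∀ x ∈ ls.filterMap List.head?, x.1.1 = (b : Int) ∧ (r : Int) ≤ x.1.2) := by
  induction ls with
  | nil => intro b r _; simp
  | cons l ls ih =>
    intro b r hH
    have hHtl : pvH ls b (r + 1) := by
      intro i hi j hj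
      have h := hH (i + 1) (by simp only [List.length_cons]; omega) j (by simpa using hj)
      simp only [List.getElem_cons_succ] at h
      rw [h]
      congr 1
      push_cast
      ring
    obtain ⟨hp, hm⟩ := ih b (r + 1) hHtl
    cases l with
    | nil =>
      simp only [List.filterMap_cons, List.head?_nil]
      refine ⟨hp, ?_⟩
      intro x hx
      obtain ⟨h1, h2⟩ := hm x hx
      refine ⟨h1, ?_⟩
      push_cast at h2 ⊢
      omega
    | cons hd t =>
      have hhd : hd.1 = ((b : Int), (r : Int)) := by
        have h := hH 0 (by simp) 0 (by simp)
        simpa using h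
      have hb1 : hd.1.1 = (b : Int) := by rw [hhd]
      have hb2 : hd.1.2 = (r : Int) := by rw [hhd]
      simp only [List.filterMap_cons, List.head?_cons]
      constructor
      · refine List.Pairwise.cons ?_ hp
        intro y hy
        obtain ⟨h1, h2⟩ := hm y hy
        rw [pvKey_lt_iff]
        right
        refine ⟨by rw [hb1, h1], ?_⟩
        rw [hb2, h1] at *
        push_cast at h2 ⊢
        omega
      · intro x hx
        rcases List.mem_cons.mp hx with h | h
        · subst h; exact ⟨hb1, le_of_eq hb2.symm⟩
        · obtain ⟨h1, h2⟩ := hm x h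
          refine ⟨h1, ?_⟩
          push_cast at h2 ⊢
          omega

lemma pvRR_pairwise (ls : List (List ((Int × Int) × pvAI))) :
    ∀ b r, pvH ls b r →
      ((pvRR ls).Pairwise (fun x y => pvKey x < pvKey y)) ∧
      (∀ x ∈ pvRR ls, (b : Int) ≤ x.1.1) := by
  induction ls using pvRR.induct with
  | case1 ls h =>
    intro b r hH
    rw [pvRR]
    simp [h]
  | case2 ls h ih =>
    intro b r hH
    have hHtl : pvH (ls.map List.tail) (b + 1) r := by
      intro i hi j hj
      have hi' : i < ls.length := by simpa using hi
      have hj' : j + 1 < (ls[i]).length := by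
        simp only [List.getElem_map, List.length_tail] at hj
        omega
      have h2 := hH i hi' (j + 1) hj'
      simp only [List.getElem_map]
      rw [List.getElem_tail, h2]
      congr 1
      push_cast
      ring
    obtain ⟨hp1, hm1⟩ := pvHeads_facts ls b r hH
    obtain ⟨hp2, hm2⟩ := ih (b + 1) r hHtl
    rw [pvRR, dif_neg h]
    constructor
    · rw [List.pairwise_append]
      refine ⟨hp1, hp2, ?_⟩
      intro x hx y hy
      have h1 := (hm1 x hx).1
      have h2 := hm2 y hy
      rw [pvKey_lt_iff]
      left
      push_cast at h1 h2 ⊢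
      omega
    · intro x hx
      rcases List.mem_append.mp hx with hx | hx
      · rw [(hm1 x hx).1]
      · have h2 := hm2 x hx
        push_cast at h2 ⊢
        omega

-- ---------- pvGroupsD facts ----------
lemma pvGroupsD_H (xs : List pvAI) : pvH (pvGroupsD xs) 0 0 := by
  intro i hi j hj
  simp only [pvGroupsD, List.getElem_map, List.getElem_zipIdx, pvGDec] at hj ⊢
  simp at hj ⊢

lemma pvGroupsD_map_snd (xs : List pvAI) :
    (pvGroupsD xs).map (List.map Prod.snd) = (pvK xs).map (pvGrp xs) := by
  simp only [pvGroupsD, List.map_map]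
  have h1 : (List.map Prod.snd ∘ fun p : Int × Nat => pvGDec p.2 (pvGrp xs p.1)) =
      (fun p : Int × Nat => pvGrp xs p.1) := by
    funext p
    simp only [Function.comp, pvGDec, List.map_map]
    exact List.zipIdx_map_fst 0 _
  rw [h1, show (fun p : Int × Nat => pvGrp xs p.1) = (pvGrp xs) ∘ Prod.fst from rfl,
    ← List.map_map, List.zipIdx_map_fst]

-- ---------- B-side: the fold invariant ----------
lemma pvGDec_append (r : Nat) (l : List pvAI) (a : pvAI) :
    pvGDec r (l ++ [a]) = pvGDec r l ++ [(((l.length : Int), (r : Int)), a)] := by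
  simp [pvGDec, List.zipIdx_append]

lemma pvK_append (xs : List pvAI) (a : pvAI) :
    pvK (xs ++ [a]) = if a.1 ∈ pvK xs then pvK xs else pvK xs ++ [a.1] := by
  have : pvK (xs ++ [a]) = PySem.Set.add (pvK xs) a.1 := by
    simp [pvK, PySem.Set.ofList, List.foldl_append]
  rw [this]
  by_cases hm : a.1 ∈ pvK xs
  · simp [PySem.Set.add, PySem.Set.contains, hm]
  · simp [PySem.Set.add, PySem.Set.contains, hm]

lemma pvGrp_append (xs : List pvAI) (a : pvAI) (f : Int) :
    pvGrp (xs ++ [a]) f = pvGrp xs f ++ (if a.1 = f then [a] else []) := by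
  simp only [pvGrp, List.filter_append, List.filter_cons, List.filter_nil]
  by_cases h : a.1 = f
  · simp [h]
  · simp [h]

lemma pvFlatten_update_perm (g : Int × Nat → List ((Int × Int) × pvAI)) (e : Nat → (Int × Int) × pvAI) :
    ∀ (K : List Int) (n : Nat), K.Nodup → ∀ f, f ∈ K →
      ((((K.zipIdx n).map (fun p => if p.1 = f then g p ++ [e p.2] else g p)).flatten).Perm
        (((K.zipIdx n).map g).flatten ++ [e (n + K.idxOf f)])) := by
  intro K
  induction K with
  | nil => intro n _ f hf; simp at hf
  | cons c K ih =>
    intro n hnd f hf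
    rw [List.zipIdx_cons, List.map_cons, List.map_cons, List.flatten_cons, List.flatten_cons]
    by_cases hcf : c = f
    · subst hcf
      have hnotin : c ∉ K := (List.nodup_cons.mp hnd).1
      have hrest : (K.zipIdx (n + 1)).map (fun p => if p.1 = c then g p ++ [e p.2] else g p) =
          (K.zipIdx (n + 1)).map g := by
        refine List.map_congr_left ?_
        intro p hp
        have hmem : p.1 ∈ K := List.fst_mem_of_mem_zipIdx hp
        have hne : ¬ p.1 = c := fun hh => hnotin (hh ▸ hmem)
        simp [hne]
      rw [hrest, if_pos rfl, List.idxOf_cons_self, Nat.add_zero, List.append_assoc,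
        List.append_assoc]
      exact List.Perm.append_left _ List.perm_append_comm
    · have hf' : f ∈ K := by
        rcases List.mem_cons.mp hf with h | h
        · exact absurd h.symm hcf
        · exact h
      rw [if_neg hcf]
      have hidx : List.idxOf f (c :: K) = List.idxOf f K + 1 := by
        simp [hcf]
      rw [hidx, show n + (List.idxOf f K + 1) = (n + 1) + List.idxOf f K from by omega,
        List.append_assoc]
      exact List.Perm.append_left _ (ih (n + 1) (List.nodup_cons.mp hnd).2 f hf')

lemma pvGrp_nil_of_not_mem (xs : List pvAI) (f : Int) (h : f ∉ pvK xs) : pvGrp xs f = [] := by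
  rw [pvGrp, List.filter_eq_nil_iff]
  intro a ha hb
  exact h ((PySem.Set.mem_ofList _ _).mpr (by
    rw [List.mem_map]
    exact ⟨a, ha, eq_of_beq hb⟩))

lemma pvFold_char (xs : List pvAI) :
    ((xs.foldl pvDecStep (PySem.Dict.empty, [])).1.keys = pvK xs)
  ∧ (∀ f : Int, (xs.foldl pvDecStep (PySem.Dict.empty, [])).1.get? f =
      if f ∈ pvK xs then some ((((pvK xs).idxOf f : Nat) : Int), (((pvGrp xs f).length : Nat) : Int)) else none)
  ∧ ((xs.foldl pvDecStep (PySem.Dict.empty, [])).2.Perm (pvGroupsD xs).flatten) := by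
  induction xs using List.reverseRecOn with
  | nil =>
    refine ⟨rfl, ?_, ?_⟩
    · intro f
      have hnm : f ∉ pvK ([] : List pvAI) := by simp [pvK, PySem.Set.ofList, PySem.Set.empty]
      rw [if_neg hnm]
      rfl
    · simp [pvGroupsD, pvK, PySem.Set.ofList, PySem.Set.empty]
  | append_singleton xs a ih =>
    obtain ⟨hkeys, hget, hperm⟩ := ih
    rw [List.foldl_append, List.foldl_cons, List.foldl_nil]
    by_cases hm : a.1 ∈ pvK xs
    · -- existing family
      have hK' : pvK (xs ++ [a]) = pvK xs := by rw [pvK_append, if_pos hm]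
      have hgeta : (xs.foldl pvDecStep (PySem.Dict.empty, [])).1.get? a.1 =
          some ((((pvK xs).idxOf a.1 : Nat) : Int), (((pvGrp xs a.1).length : Nat) : Int)) := by
        rw [hget, if_pos hm]
      have hstep : pvDecStep (xs.foldl pvDecStep (PySem.Dict.empty, [])) a =
          ((xs.foldl pvDecStep (PySem.Dict.empty, [])).1.insert a.1
             ((((pvK xs).idxOf a.1 : Nat) : Int), (((pvGrp xs a.1).length : Nat) : Int) + 1),
           (xs.foldl pvDecStep (PySem.Dict.empty, [])).2 ++
             [(((((pvGrp xs a.1).length : Nat) : Int), (((pvK xs).idxOf a.1 : Nat) : Int)), a)]) := by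
        rw [pvDecStep, hgeta]
      rw [hstep]
      have hcont : (xs.foldl pvDecStep (PySem.Dict.empty, [])).1.contains a.1 = true :=
        (pvContains_iff _ _).mpr (by rw [hkeys]; exact hm)
      refine ⟨?_, ?_, ?_⟩
      · rw [pvKeys_insert, hcont, if_pos rfl, hkeys, hK']
      · intro f
        by_cases hf : f = a.1
        · rw [hf, PySem.Dict.get?_insert_self, hK', if_pos hm]
          have hlen : (pvGrp (xs ++ [a]) a.1).length = (pvGrp xs a.1).length + 1 := by
            rw [pvGrp_append, if_pos rfl]
            simp
          rw [hlen]
          push_cast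
          ring_nf
        · rw [PySem.Dict.get?_insert_of_ne _ _ hf, hget f, hK']
          by_cases hfK : f ∈ pvK xs
          · rw [if_pos hfK, if_pos hfK]
            have hlen : pvGrp (xs ++ [a]) f = pvGrp xs f := by
              rw [pvGrp_append, if_neg (fun h => hf h.symm), List.append_nil]
            rw [hlen]
          · rw [if_neg hfK, if_neg hfK]
      · have hKnd : (pvK xs).Nodup := PySem.Set.nodup_ofList _
        have hupd := pvFlatten_update_perm (fun p => pvGDec p.2 (pvGrp xs p.1))
            (fun rr => (((((pvGrp xs a.1).length : Nat) : Int), ((rr : Nat) : Int)), a))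
            (pvK xs) 0 hKnd a.1 hm
        have hgd : pvGroupsD (xs ++ [a]) =
            ((pvK xs).zipIdx).map (fun p =>
              if p.1 = a.1 then
                pvGDec p.2 (pvGrp xs p.1) ++
                  [(((((pvGrp xs a.1).length : Nat) : Int), ((p.2 : Nat) : Int)), a)]
              else pvGDec p.2 (pvGrp xs p.1)) := by
          rw [pvGroupsD, hK']
          refine List.map_congr_left ?_
          intro p _
          by_cases hpf : p.1 = a.1
          · rw [if_pos hpf, pvGrp_append, if_pos hpf.symm, hpf, pvGDec_append]
          · rw [if_neg hpf, pvGrp_append, if_neg (fun h => hpf h.symm), List.append_nil]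
        rw [hgd]
        have hz : (0 : Nat) + (pvK xs).idxOf a.1 = (pvK xs).idxOf a.1 := by omega
        rw [hz] at hupd
        exact (hperm.append_right _).trans hupd.symm
    · -- new family
      have hK' : pvK (xs ++ [a]) = pvK xs ++ [a.1] := by rw [pvK_append, if_neg hm]
      have hgeta : (xs.foldl pvDecStep (PySem.Dict.empty, [])).1.get? a.1 = none := by
        rw [hget, if_neg hm]
      have hsize : (xs.foldl pvDecStep (PySem.Dict.empty, [])).1.size = (pvK xs).length := by
        rw [← hkeys]
        simp [PySem.Dict.size, PySem.Dict.keys]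
      have hstep : pvDecStep (xs.foldl pvDecStep (PySem.Dict.empty, [])) a =
          ((xs.foldl pvDecStep (PySem.Dict.empty, [])).1.insert a.1
             ((((pvK xs).length : Nat) : Int), (0 : Int) + 1),
           (xs.foldl pvDecStep (PySem.Dict.empty, [])).2 ++
             [(((0 : Int), (((pvK xs).length : Nat) : Int)), a)]) := by
        rw [pvDecStep, hgeta, hsize]
      rw [hstep]
      have hcont : (xs.foldl pvDecStep (PySem.Dict.empty, [])).1.contains a.1 = false := by
        rw [← Bool.not_eq_true]
        intro hc
        exact hm (hkeys ▸ (pvContains_iff _ _).mp hc)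
      have hgrpa : pvGrp xs a.1 = [] := pvGrp_nil_of_not_mem xs a.1 hm
      refine ⟨?_, ?_, ?_⟩
      · rw [pvKeys_insert, hcont, if_neg (by simp), hkeys, hK']
      · intro f
        by_cases hf : f = a.1
        · rw [hf, PySem.Dict.get?_insert_self, hK', if_pos (by simp)]
          have hidx : (pvK xs ++ [a.1]).idxOf a.1 = (pvK xs).length := by
            rw [List.idxOf_append, if_neg hm]
            simp
          have hlen : (pvGrp (xs ++ [a]) a.1).length = 1 := by
            rw [pvGrp_append, if_pos rfl, hgrpa]
            simp
          rw [hidx, hlen]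
          norm_num
        · rw [PySem.Dict.get?_insert_of_ne _ _ hf, hget f, hK']
          have hmem' : (f ∈ pvK xs ++ [a.1]) ↔ (f ∈ pvK xs) := by
            simp [List.mem_append, hf]
          by_cases hfK : f ∈ pvK xs
          · rw [if_pos hfK, if_pos (hmem'.mpr hfK)]
            have hidx : (pvK xs ++ [a.1]).idxOf f = (pvK xs).idxOf f := by
              rw [List.idxOf_append, if_pos hfK]
            have hlen : pvGrp (xs ++ [a]) f = pvGrp xs f := by
              rw [pvGrp_append, if_neg (fun h => hf h.symm), List.append_nil]
            rw [hidx, hlen]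
          norm_num
          · simp [hfK, hf]
      · have hgd : pvGroupsD (xs ++ [a]) =
            ((pvK xs).zipIdx).map (fun p => pvGDec p.2 (pvGrp xs p.1)) ++
              [[(((0 : Int), (((pvK xs).length : Nat) : Int)), a)]] := by
          rw [pvGroupsD, hK', List.zipIdx_append, List.map_append]
          congr 1
          · refine List.map_congr_left ?_
            intro p hp
            have hmem : p.1 ∈ pvK xs := List.fst_mem_of_mem_zipIdx hp
            have hne : ¬ a.1 = p.1 := fun h => hm (h ▸ hmem)
            rw [pvGrp_append, if_neg hne, List.append_nil]
          · simp only [List.zipIdx_cons, List.zipIdx_nil, List.map_cons, List.map_nil]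
            rw [pvGrp_append, if_pos rfl, hgrpa]
            simp [pvGDec]
        rw [hgd, List.flatten_append]
        simp only [List.flatten_cons, List.flatten_nil, List.append_nil]
        exact hperm.append_right _

-- ---------- B-side: sort characterisation ----------
lemma pvSorted2_eq_sorted (xs : List ((Int × Int) × pvAI)) :
    PySem.List.sorted2 xs (fun p => p.1.1) (fun p => p.1.2) =
    PySem.List.sorted xs pvKey := by
  rw [PySem.List.sorted_eq_foldl_insertBy]
  show List.foldl (fun acc x => PySem.List.insertBy _ x acc) [] xs = _
  have hfun : (fun (a b : (Int × Int) × pvAI) =>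
      decide (a.1.1 < b.1.1) || (!decide (b.1.1 < a.1.1) && decide (a.1.2 < b.1.2))) =
      (fun a b => decide (pvKey a < pvKey b)) := by
    funext a b
    simp only [pvKey, Prod.Lex.toLex_lt_toLex]
    by_cases h1 : a.1.1 < b.1.1
    · simp [h1]
    · by_cases h2 : b.1.1 < a.1.1
      · have hne : ¬ a.1.1 = b.1.1 := by omega
        simp [h1, h2, hne]
      · have heq : a.1.1 = b.1.1 := by omega
        simp [heq]
  rw [← hfun]
  rfl

lemma pvB_eq (xs : List pvAI) :
    interleave_addrinfos_py_alt xs = (pvRR (pvGroupsD xs)).map Prod.snd := by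
  obtain ⟨-, -, hperm⟩ := pvFold_char xs
  show (PySem.List.sorted2 ((xs.foldl pvDecStep (PySem.Dict.empty, [])).2) _ _).map _ = _
  rw [pvSorted2_eq_sorted]
  have hpair := (pvRR_pairwise (pvGroupsD xs) 0 0 (pvGroupsD_H xs)).1
  have hperm2 : (pvRR (pvGroupsD xs)).Perm ((xs.foldl pvDecStep (PySem.Dict.empty, [])).2) :=
    (pvRR_perm_flatten _).trans hperm.symm
  rw [PySem.List.sorted_eq_of_perm_of_pairwise_lt _ _ pvKey hperm2 hpair]

-- ===== VERDICT (by name: the statement is the Claim_ definition above) =====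
theorem interleave_addrinfos_py_spec : Claim_equal_interleave_addrinfos_py := by
  intro xs _
  show interleave_addrinfos_py xs = interleave_addrinfos_py_alt xs
  rw [pvA_eq, pvB_eq, ← pvGroupsD_map_snd, pvRR_map]
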